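-- pv_equiv track=rewrite | github.com/V-Neck/Euler | prob6.py | cancel
-- ===== SOURCE A (Python) =====
-- def cancel(ll):
--     l0 = []
--     for l in ll:
--         for i in l:
--             if i in l0:
--                 l0.remove(i)
--         l0.extend(l)
--     return l0
-- ===== SOURCE B (Python) =====
-- def cancel(ll):
--     l0 = []
--     for l in ll:
--         need = {}
--         for i in l:
--             need[i] = need.get(i, 0) + 1
--         kept = []
--         for x in l0:
--             n = need.get(x, 0)
--             if n > 0:
--                 need[x] = n - 1
--             else:
--                 kept.append(x)
--         l0 = kept + l
--     return l0
-- ===== Notes on version B (the rewrite author's own statement) =====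
-- stated objective: faster
-- what changed: Instead of per-element membership tests and list.remove scans over the accumulator, B builds a count map of each incoming sublist once and filters the accumulator in a single pass, dropping the first need[x] occurrences of each value.
import Mathlib
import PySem

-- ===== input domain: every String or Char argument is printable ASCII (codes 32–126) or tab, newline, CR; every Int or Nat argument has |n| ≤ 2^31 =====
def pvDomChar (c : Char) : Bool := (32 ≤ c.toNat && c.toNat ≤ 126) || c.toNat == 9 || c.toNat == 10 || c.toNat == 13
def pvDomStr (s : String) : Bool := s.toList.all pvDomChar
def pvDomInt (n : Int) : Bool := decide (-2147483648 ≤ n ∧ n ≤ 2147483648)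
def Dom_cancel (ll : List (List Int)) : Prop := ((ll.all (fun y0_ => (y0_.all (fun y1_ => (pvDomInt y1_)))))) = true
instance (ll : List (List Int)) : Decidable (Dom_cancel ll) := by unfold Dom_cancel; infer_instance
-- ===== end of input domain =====

-- B replaces A's per-element membership test + list.remove scan by a count map of the
-- sublist built once and a single filtering pass over the accumulator (objective: faster).


-- ===== PORT A =====
def cancel (ll : List (List Int)) : List Int :=
  ll.foldl (fun l0 l =>
    (l.foldl (fun acc i =>
      if i ∈ acc then (PySem.List.remove? acc i).getD acc else acc) l0) ++ l) []

-- ===== PORT B =====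
-- the 'for x in l0' filtering loop of Source B (kept.append / need[x] -= 1), as structural recursion
def cancelPass (need : PySem.Dict Int Int) : List Int → List Int
  | [] => []
  | x :: xs =>
    let n := need.getD x 0
    if n > 0 then cancelPass (need.insert x (n - 1)) xs
    else x :: cancelPass need xs

-- the 'need[i] = need.get(i, 0) + 1' counting loop of Source B
def cancelNeed (l : List Int) : PySem.Dict Int Int :=
  l.foldl (fun d i => d.insert i (d.getD i 0 + 1)) PySem.Dict.empty

def cancel_alt (ll : List (List Int)) : List Int :=
  ll.foldl (fun l0 l => cancelPass (cancelNeed l) l0 ++ l) []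

-- ===== PRECONDITION & SPEC =====
def Spec_cancel (ll : List (List Int)) (out : List Int) : Prop := out = cancel_alt ll
instance (ll : List (List Int)) (out : List Int) : Decidable (Spec_cancel ll out) := by unfold Spec_cancel; infer_instance

-- ===== CLAIM (what is proved, stated in full; the proofs are below) =====
def Claim_equal_cancel : Prop := ∀ (ll : List (List Int)), Dom_cancel ll → Spec_cancel ll (cancel ll)

-- ===== LEMMAS AND PROOFS =====

-- cancelPass only depends on the getD-view of the dict
theorem cancelPass_congr (d₁ d₂ : PySem.Dict Int Int)
    (h : ∀ x, d₁.getD x 0 = d₂.getD x 0) (l0 : List Int) :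
    cancelPass d₁ l0 = cancelPass d₂ l0 := by
  induction l0 generalizing d₁ d₂ with
  | nil => rfl
  | cons x xs ih =>
    simp only [cancelPass, h x]
    split_ifs with hn
    · exact ih _ _ (by
        intro y
        by_cases hy : y = x <;> simp [PySem.Dict.getD_insert, hy, h y])
    · rw [ih _ _ h]

theorem cancelPass_empty (l0 : List Int) : cancelPass PySem.Dict.empty l0 = l0 := by
  induction l0 with
  | nil => rfl
  | cons x xs ih => simp [cancelPass, PySem.Dict.getD_empty, ih]

-- A's removal step, abbreviated for the lemmas below
def cancelRm (i : Int) (l0 : List Int) : List Int :=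
  if i ∈ l0 then (PySem.List.remove? l0 i).getD l0 else l0

theorem cancelRm_cons_of_ne (i x : Int) (xs : List Int) (hx : x ≠ i) :
    cancelRm i (x :: xs) = x :: cancelRm i xs := by
  unfold cancelRm
  by_cases hmem : i ∈ xs
  · rw [if_pos (List.mem_cons_of_mem _ hmem), if_pos hmem,
      PySem.List.remove?_cons_of_ne xs hx]
    simp [PySem.List.remove?_eq_some_erase xs i hmem]
  · have : i ∉ x :: xs := by simp [hmem, Ne.symm hx]
    rw [if_neg this, if_neg hmem]

-- key step: bumping the count of i by one = removing the first occurrence of i first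
theorem cancelPass_bump (l0 : List Int) : ∀ (d : PySem.Dict Int Int) (i : Int),
    (∀ x, 0 ≤ d.getD x 0) →
    cancelPass (d.insert i (d.getD i 0 + 1)) l0 = cancelPass d (cancelRm i l0) := by
  induction l0 with
  | nil => intro d i _; rfl
  | cons x xs ih =>
    intro d i hpos
    by_cases hx : x = i
    · subst hx
      have h1 : (d.insert x (d.getD x 0 + 1)).getD x 0 = d.getD x 0 + 1 := by
        simp [PySem.Dict.getD_insert]
      unfold cancelRm
      simp only [cancelPass, h1, List.mem_cons, true_or, if_pos,
        PySem.List.remove?_cons_self, Option.getD_some]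
      rw [if_pos (by have := hpos x; omega)]
      exact cancelPass_congr _ _ (by
        intro y
        by_cases hy : y = x <;> simp [PySem.Dict.getD_insert, hy]) xs
    · have h1 : (d.insert i (d.getD i 0 + 1)).getD x 0 = d.getD x 0 := by
        simp [PySem.Dict.getD_insert, hx]
      rw [cancelRm_cons_of_ne i x xs hx]
      by_cases hn : d.getD x 0 > 0
      · have h2 : cancelPass (d.insert i (d.getD i 0 + 1)) (x :: xs)
            = cancelPass ((d.insert i (d.getD i 0 + 1)).insert x (d.getD x 0 - 1)) xs := by
          simp only [cancelPass, h1]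
          rw [if_pos hn]
        have h3 : cancelPass d (x :: cancelRm i xs)
            = cancelPass (d.insert x (d.getD x 0 - 1)) (cancelRm i xs) := by
          simp only [cancelPass]
          rw [if_pos hn]
        rw [h2, h3]
        have hpos' : ∀ y, 0 ≤ (d.insert x (d.getD x 0 - 1)).getD y 0 := by
          intro y
          by_cases hy : y = x <;> simp [PySem.Dict.getD_insert, hy, hpos y] <;>
            (have := hpos x; omega)
        rw [← ih (d.insert x (d.getD x 0 - 1)) i hpos']
        apply cancelPass_congr
        intro y
        by_cases hyx : y = x <;> by_cases hyi : y = i <;>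
          simp_all [PySem.Dict.getD_insert]
      · have h2 : cancelPass (d.insert i (d.getD i 0 + 1)) (x :: xs)
            = x :: cancelPass (d.insert i (d.getD i 0 + 1)) xs := by
          simp only [cancelPass, h1]
          rw [if_neg hn]
        have h3 : cancelPass d (x :: cancelRm i xs)
            = x :: cancelPass d (cancelRm i xs) := by
          simp only [cancelPass]
          rw [if_neg hn]
        rw [h2, h3, ih d i hpos]

theorem cancelNeed_eq_counter (l : List Int) : cancelNeed l = PySem.Dict.counter l :=
  PySem.Dict.foldl_insert_getD_add_one_eq_counter l

theorem cancelNeed_getD (l : List Int) (x : Int) :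
    (cancelNeed l).getD x 0 = (l.count x : Int) := by
  rw [cancelNeed_eq_counter]
  exact PySem.Dict.getD_counter l x

-- per-sublist equivalence: A's remove loop = B's counted filtering pass
theorem cancel_inner (l : List Int) : ∀ l0 : List Int,
    l.foldl (fun acc i => if i ∈ acc then (PySem.List.remove? acc i).getD acc else acc) l0
      = cancelPass (cancelNeed l) l0 := by
  induction l with
  | nil => intro l0; exact (cancelPass_empty l0).symm
  | cons i t ih =>
    intro l0
    simp only [List.foldl_cons]
    rw [ih (if i ∈ l0 then (PySem.List.remove? l0 i).getD l0 else l0)]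
    have h1 : cancelPass (cancelNeed t) (cancelRm i l0)
        = cancelPass ((cancelNeed t).insert i ((cancelNeed t).getD i 0 + 1)) l0 :=
      (cancelPass_bump l0 (cancelNeed t) i (fun x => by rw [cancelNeed_getD]; positivity)).symm
    show cancelPass (cancelNeed t) (cancelRm i l0) = _
    rw [h1]
    apply cancelPass_congr
    intro y
    by_cases hy : y = i
    · simp [PySem.Dict.getD_insert, hy, cancelNeed_getD, List.count_cons]
    · simp [PySem.Dict.getD_insert, hy, Ne.symm hy, cancelNeed_getD]

-- ===== VERDICT (by name: the statement is the Claim_ definition above) =====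
theorem cancel_spec : Claim_equal_cancel := by
  intro ll _
  unfold Spec_cancel cancel cancel_alt
  congr 1
  funext l0 l
  rw [cancel_inner l l0]
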